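-- pv_equiv track=rewrite | github.com/aradha/agop_feature_learning | kernel_machine_agop/conv_rfm/crfm_src/utils.py | get_batch_size
-- ===== SOURCE A (Python) =====
-- def get_batch_size(n1, n2, num_devices):
--     n1_ = n1//num_devices
--     max_batch_size = 100
--     best_batch_size = 1
--     for i in range(1,max_batch_size+1):
--         if (n1_%i == 0) and (n2%i==0):
--             best_batch_size = i
--     return best_batch_size
-- ===== SOURCE B (Python) =====
-- def get_batch_size(n1, n2, num_devices):
--     # Return value only: largest i in 1..100 dividing both n1//num_devices and n2.
--     a = abs(n1 // num_devices)
--     b = abs(n2)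
--     while b:
--         a, b = b, a % b
--     g = a  # gcd of the two operands
--     if g == 0:
--         return 100  # every i in 1..100 divides 0
--     best = 1
--     d = 1
--     while d * d <= g:
--         if g % d == 0:
--             if d <= 100 and best < d:
--                 best = d
--             q = g // d
--             if q <= 100 and best < q:
--                 best = q
--         d += 1
--     return best
-- ===== Notes on version B (the rewrite author's own statement) =====
-- stated objective: alternative
-- what changed: Instead of scanning i=1..100 with two modulo tests each, B computes g = gcd(n1//num_devices, n2) by Euclid's algorithm and then enumerates divisors of g up to sqrt(g), keeping the largest divisor <= 100 (returning 100 when g = 0).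
import Mathlib
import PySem

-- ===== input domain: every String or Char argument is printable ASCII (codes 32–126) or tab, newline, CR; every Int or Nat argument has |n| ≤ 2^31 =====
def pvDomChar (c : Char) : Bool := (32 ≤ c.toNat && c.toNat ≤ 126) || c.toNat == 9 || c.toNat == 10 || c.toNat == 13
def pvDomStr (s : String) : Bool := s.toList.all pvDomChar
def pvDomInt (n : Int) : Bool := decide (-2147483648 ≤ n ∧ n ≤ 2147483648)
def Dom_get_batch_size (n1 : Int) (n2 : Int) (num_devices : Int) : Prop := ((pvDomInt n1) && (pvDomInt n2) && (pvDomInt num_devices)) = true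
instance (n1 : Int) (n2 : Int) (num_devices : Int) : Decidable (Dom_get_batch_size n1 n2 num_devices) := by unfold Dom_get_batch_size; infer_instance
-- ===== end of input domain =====

-- B computes gcd(n1//num_devices, n2) by Euclid and enumerates its divisors up to √g, instead of A's scan of i = 1..100; return values only (neither mutates anything).

-- ===== PORT A =====
def get_batch_size (n1 : Int) (n2 : Int) (num_devices : Int) : Int :=
  let n1_ := PySem.Int.floordiv n1 num_devices
  (PySem.List.pyRange 1 101 1).foldl
    (fun best i => if PySem.Int.mod n1_ i = 0 ∧ PySem.Int.mod n2 i = 0 then i else best) 1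

-- ===== PORT B =====
-- Euclid loop of Source B; both operands are nonnegative (abs of the Python ints), so they live in Nat.
def gcdLoop (a b : Nat) : Nat :=
  if b = 0 then a else gcdLoop b (a % b)
termination_by b
decreasing_by exact Nat.mod_lt _ (by omega)

-- second `if` of Source B's loop body: try the cofactor q = g // d
def stepQ (g d b1 : Nat) : Nat :=
  if g / d ≤ 100 ∧ b1 < g / d then g / d else b1

-- body of Source B's `while d * d <= g` loop: update best with d, then with q = g // d
def stepB (g d best : Nat) : Nat :=
  if g % d = 0 then stepQ g d (if d ≤ 100 ∧ best < d then d else best) else best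

-- the `while d * d <= g` divisor-enumeration loop of Source B
def divLoop (g d best : Nat) : Nat :=
  if h : d * d ≤ g then divLoop g (d + 1) (stepB g d best) else best
termination_by g + 1 - d * d
decreasing_by
  have h2 : (d + 1) * (d + 1) = d * d + 2 * d + 1 := by ring
  omega

def get_batch_size_alt (n1 : Int) (n2 : Int) (num_devices : Int) : Int :=
  let a := (PySem.Int.floordiv n1 num_devices).natAbs
  let b := n2.natAbs
  let g := gcdLoop a b
  if g = 0 then 100 else (divLoop g 1 1 : Int)

-- ===== PRECONDITION & SPEC =====
-- num_devices = 0 makes Python's n1 // num_devices raise ZeroDivisionError (in A and in B alike)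
def Pre_get_batch_size (n1 : Int) (n2 : Int) (num_devices : Int) : Prop := num_devices ≠ 0
instance (n1 : Int) (n2 : Int) (num_devices : Int) : Decidable (Pre_get_batch_size n1 n2 num_devices) := by unfold Pre_get_batch_size; infer_instance
def pvWitness_get_batch_size : Int × Int × Int := (7, 6, 2)

def Spec_get_batch_size (n1 : Int) (n2 : Int) (num_devices : Int) (out : Int) : Prop := out = get_batch_size_alt n1 n2 num_devices
instance (n1 : Int) (n2 : Int) (num_devices : Int) (out : Int) : Decidable (Spec_get_batch_size n1 n2 num_devices out) := by unfold Spec_get_batch_size; infer_instance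

-- ===== CLAIM (what is proved, stated in full; the proofs are below) =====
def Claim_equal_get_batch_size : Prop := ∀ (n1 : Int) (n2 : Int) (num_devices : Int), Dom_get_batch_size n1 n2 num_devices → Pre_get_batch_size n1 n2 num_devices → Spec_get_batch_size n1 n2 num_devices (get_batch_size n1 n2 num_devices)

-- ===== LEMMAS AND PROOFS =====

theorem gcdLoop_eq (a b : Nat) : gcdLoop a b = Nat.gcd a b := by
  fun_induction gcdLoop a b with
  | case1 a => simp
  | case2 a b h ih => rw [ih, Nat.gcd_comm a b, Nat.gcd_rec b a, Nat.gcd_comm]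

theorem stepB_good (g d best : Nat)
    (h1 : best ∣ g) (h2 : 1 ≤ best) (h3 : best ≤ 100) :
    stepB g d best ∣ g ∧ 1 ≤ stepB g d best ∧ stepB g d best ≤ 100 := by
  unfold stepB stepQ
  by_cases hd : g % d = 0
  · have hdvd : d ∣ g := Nat.dvd_iff_mod_eq_zero.mpr hd
    have hq : g / d ∣ g := Nat.div_dvd_of_dvd hdvd
    rw [if_pos hd]
    split_ifs <;>
      exact ⟨by first | exact hq | exact hdvd | exact h1, by omega, by omega⟩
  · rw [if_neg hd]
    exact ⟨h1, h2, h3⟩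

theorem stepB_mono (g d best : Nat) : best ≤ stepB g d best := by
  unfold stepB stepQ
  split_ifs <;> omega

theorem stepB_ge_d (g d best : Nat) (hd : g % d = 0) (h100 : d ≤ 100) :
    d ≤ stepB g d best := by
  unfold stepB stepQ
  rw [if_pos hd]
  split_ifs <;> omega

theorem stepB_ge_q (g d best : Nat) (hd : g % d = 0) (h100 : g / d ≤ 100) :
    g / d ≤ stepB g d best := by
  unfold stepB stepQ
  rw [if_pos hd]
  split_ifs <;> omega

theorem divLoop_good (g d best : Nat)
    (h1 : best ∣ g) (h2 : 1 ≤ best) (h3 : best ≤ 100) :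
    divLoop g d best ∣ g ∧ 1 ≤ divLoop g d best ∧ divLoop g d best ≤ 100 := by
  fun_induction divLoop g d best with
  | case1 d best h ih =>
    obtain ⟨s1, s2, s3⟩ := stepB_good g d best h1 h2 h3
    exact ih s1 s2 s3
  | case2 d best h => exact ⟨h1, h2, h3⟩

theorem divLoop_mono (g d best : Nat) : best ≤ divLoop g d best := by
  fun_induction divLoop g d best with
  | case1 d best h ih => exact le_trans (stepB_mono g d best) ih
  | case2 d best h => exact le_refl _

theorem divLoop_reach (g d best i d0 : Nat)
    (hi100 : i ≤ 100) (hd0 : d ≤ d0) (hsq : d0 * d0 ≤ g)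
    (hmod : g % d0 = 0) (hcase : i = d0 ∨ i = g / d0) :
    i ≤ divLoop g d best := by
  fun_induction divLoop g d best with
  | case1 d best h ih =>
    by_cases hdd : d = d0
    · subst hdd
      refine le_trans ?_ (divLoop_mono g (d + 1) (stepB g d best))
      rcases hcase with rfl | rfl
      · exact stepB_ge_d g i best hmod hi100
      · exact stepB_ge_q g d best hmod hi100
    · exact ih (by omega)
  | case2 d best h =>
    exact absurd (le_trans (Nat.mul_le_mul hd0 hd0) hsq) h

theorem divLoop_ge (g i : Nat) (hg : 1 ≤ g) (hdvd : i ∣ g) (hi1 : 1 ≤ i) (hi100 : i ≤ 100) :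
    i ≤ divLoop g 1 1 := by
  by_cases hsq : i * i ≤ g
  · exact divLoop_reach g 1 1 i i hi100 hi1 hsq (Nat.dvd_iff_mod_eq_zero.mp hdvd) (Or.inl rfl)
  · have hile : i ≤ g := Nat.le_of_dvd hg hdvd
    have hmul : g / i * i = g := Nat.div_mul_cancel hdvd
    have hlt : g / i < i := by
      by_contra hge
      push Not at hge
      have : i * i ≤ g / i * i := Nat.mul_le_mul_right i hge
      omega
    have hd0pos : 1 ≤ g / i := (Nat.one_le_div_iff (by omega)).mpr hile
    have hsq' : g / i * (g / i) ≤ g := by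
      calc g / i * (g / i) ≤ g / i * i := Nat.mul_le_mul_left _ (le_of_lt hlt)
        _ = g := hmul
    have hdvd' : g / i ∣ g := Nat.div_dvd_of_dvd hdvd
    have hself : g / (g / i) = i := Nat.div_div_self hdvd (by omega)
    exact divLoop_reach g 1 1 i (g / i) hi100 hd0pos hsq'
      (Nat.dvd_iff_mod_eq_zero.mp hdvd') (Or.inr hself.symm)

-- A's loop over range(1, n+1), in Nat form
def lastDiv (g n : Nat) : Nat :=
  (List.range' 1 n).foldl (fun best i => if g % i = 0 then i else best) 1

theorem lastDiv_spec (g n : Nat) :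
    lastDiv g n ∣ g ∧ 1 ≤ lastDiv g n ∧ (lastDiv g n ≤ n ∨ lastDiv g n = 1) ∧
      ∀ i, 1 ≤ i → i ≤ n → i ∣ g → i ≤ lastDiv g n := by
  induction n with
  | zero =>
    refine ⟨one_dvd g, le_refl 1, Or.inr rfl, ?_⟩
    intro i h1 h2 _
    omega
  | succ n ih =>
    have hstep : lastDiv g (n + 1) =
        if g % (1 + n) = 0 then 1 + n else lastDiv g n := by
      unfold lastDiv
      rw [List.range'_1_concat, List.foldl_append]
      simp
    obtain ⟨ihd, ih1, ihb, ihmax⟩ := ih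
    by_cases hd : g % (1 + n) = 0
    · rw [hstep, if_pos hd]
      refine ⟨Nat.dvd_iff_mod_eq_zero.mpr hd, by omega, by omega, ?_⟩
      intro i h1 h2 _
      omega
    · rw [hstep, if_neg hd]
      refine ⟨ihd, ih1, by omega, ?_⟩
      intro i h1 h2 hdi
      rcases Nat.lt_or_ge i (n + 1) with hlt | hge
      · exact ihmax i h1 (by omega) hdi
      · exact absurd (Nat.dvd_iff_mod_eq_zero.mp (show (1 + n) ∣ g by
          have : i = 1 + n := by omega
          exact this ▸ hdi)) hd

-- generic: folding the "keep last passing index" step over casted Nats stays a cast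
theorem castFold (l : List Nat) (C : Nat → Prop) [DecidablePred C] (acc : Nat) :
    l.foldl (fun (b : Int) (k : Nat) => if C k then (k : Int) else b) (acc : Int)
      = ((l.foldl (fun b k => if C k then k else b) acc : Nat) : Int) := by
  induction l generalizing acc with
  | nil => rfl
  | cons x xs ih =>
    simp only [List.foldl_cons]
    by_cases hx : C x
    · simp only [hx, if_true]; exact ih x
    · simp only [hx, if_false]; exact ih acc

-- A's port equals the Nat-side lastDiv (largest divisor in 1..100) of the gcd
theorem getA_eq (n1 n2 num_devices : Int) :
    get_batch_size n1 n2 num_devices =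
      ((lastDiv (Nat.gcd (PySem.Int.floordiv n1 num_devices).natAbs n2.natAbs) 100 : Nat) : Int) := by
  unfold get_batch_size
  set n1_ := PySem.Int.floordiv n1 num_devices with hn1
  set g := Nat.gcd n1_.natAbs n2.natAbs with hgdef
  have hrange : PySem.List.pyRange 1 101 1 = (List.range' 1 100).map (fun k : Nat => (k : Int)) := by
    rw [PySem.List.pyRange_one, List.range'_eq_map_range, List.map_map]
    apply List.map_congr_left
    intro k _
    simp only [Function.comp_apply]
    push_cast
    ring
  rw [hrange, List.foldl_map]
  have hcond : ∀ (b : Int) (k : Nat), k ∈ List.range' 1 100 →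
      (if PySem.Int.mod n1_ (k : Int) = 0 ∧ PySem.Int.mod n2 (k : Int) = 0 then (k : Int) else b)
      = (if g % k = 0 then (k : Int) else b) := by
    intro b k hk
    have hiff : (PySem.Int.mod n1_ (k : Int) = 0 ∧ PySem.Int.mod n2 (k : Int) = 0) ↔ g % k = 0 := by
      rw [PySem.Int.mod_eq_zero_iff_dvd, PySem.Int.mod_eq_zero_iff_dvd,
        Int.ofNat_dvd_left, Int.ofNat_dvd_left, hgdef,
        ← Nat.dvd_iff_mod_eq_zero, Nat.dvd_gcd_iff]
    exact if_congr hiff rfl rfl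
  exact (PySem.List.foldl_congr_mem (List.range' 1 100) _ _ 1 hcond).trans
    (castFold (List.range' 1 100) (fun k => g % k = 0) 1)

-- ===== VERDICT (by name: the statement is the Claim_ definition above) =====
theorem get_batch_size_spec : Claim_equal_get_batch_size := by
  intro n1 n2 num_devices _ _
  unfold Spec_get_batch_size
  rw [getA_eq]
  simp only [get_batch_size_alt]
  rw [gcdLoop_eq]
  set g := Nat.gcd (PySem.Int.floordiv n1 num_devices).natAbs n2.natAbs with hg
  obtain ⟨hFd, hF1, hFb, hFmax⟩ := lastDiv_spec g 100
  by_cases h0 : g = 0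
  · rw [h0] at hFmax ⊢
    have h100 : 100 ≤ lastDiv 0 100 := hFmax 100 (by omega) (by omega) (dvd_zero _)
    have hb : lastDiv 0 100 ≤ 100 ∨ lastDiv 0 100 = 1 := h0 ▸ hFb
    have h : lastDiv 0 100 = 100 := by omega
    rw [h]
    norm_num
  · rw [if_neg h0]
    have hg1 : 1 ≤ g := by omega
    obtain ⟨hrd, hr1, hr100⟩ := divLoop_good g 1 1 (one_dvd g) (by omega) (by omega)
    have hF100 : lastDiv g 100 ≤ 100 := by omega
    have h1 : lastDiv g 100 ≤ divLoop g 1 1 := divLoop_ge g _ hg1 hFd hF1 hF100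
    have h2 : divLoop g 1 1 ≤ lastDiv g 100 := hFmax _ hr1 hr100 hrd
    congr 1
    omega
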